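-- pv_equiv track=rewrite | github.com/vincent-kk/Basic-Algorithm | 3. DP/problem-11052.py | solution
-- ===== SOURCE A (Python) =====
-- import collections
-- from typing import List
--
-- def solution(N: int, cards: List[int]):
--     cache = collections.defaultdict(int)
--     cards = [0] + cards
--     size = len(cards)
--     cache[1] = cards[1]
--
--     for n in range(2, N + 1):
--         local_max = 0
--         for num in range(1, n + 1 if n + 1 < size else size):
--             local_max = (
--                 local_max
--                 if local_max > (cache[n - num] + cards[num])
--                 else cache[n - num] + cards[num]
--             )
--         cache[n] = local_max
--
--     return cache[N]
-- ===== SOURCE B (Python) =====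
-- from typing import List
--
-- def solution(N: int, cards: List[int]):
--     # Demand-driven (top-down) memoization with an explicit stack instead of
--     # A's bottom-up table-filling double loop.
--     size = len(cards)
--     memo = {0: 0, 1: cards[0]}
--     if N <= 0:
--         return 0
--     stack = [N]
--     while stack:
--         n = stack[-1]
--         if n in memo:
--             stack.pop()
--         elif n - 1 not in memo:
--             stack.append(n - 1)
--         else:
--             memo[n] = max([0] + [memo[n - s] + cards[s - 1]
--                                  for s in range(1, min(n, size) + 1)])
--             stack.pop()
--     return memo[N]
-- ===== Notes on version B (the rewrite author's own statement) =====
-- stated objective: alternative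
-- what changed: Replaces A's bottom-up table-filling double loop over a defaultdict by demand-driven top-down memoization driven by an explicit work stack (push a frame until its dependency is memoized, then evaluate and pop).
import Mathlib
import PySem

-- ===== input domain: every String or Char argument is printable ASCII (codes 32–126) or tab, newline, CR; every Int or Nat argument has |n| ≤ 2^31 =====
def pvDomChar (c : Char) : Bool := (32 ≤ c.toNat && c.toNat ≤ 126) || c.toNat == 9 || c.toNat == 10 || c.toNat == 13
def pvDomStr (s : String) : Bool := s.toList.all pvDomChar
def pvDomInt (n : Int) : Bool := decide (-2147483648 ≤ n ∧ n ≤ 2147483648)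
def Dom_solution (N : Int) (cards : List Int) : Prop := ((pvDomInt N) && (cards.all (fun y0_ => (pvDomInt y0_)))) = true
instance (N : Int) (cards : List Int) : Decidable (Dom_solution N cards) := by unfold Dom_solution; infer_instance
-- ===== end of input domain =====

-- B replaces A's bottom-up table-filling double loop by demand-driven top-down
-- memoization with an explicit work stack; an alternative structure, equal
-- wherever A returns.


-- ===== PORT A =====
-- literal port of A; defaultdict reads are Dict.getD _ 0; cards[1] (which
-- raises IndexError iff cards = [], excluded by Pre_) is pyGetD _ _ 0.
def solution (N : Int) (cards : List Int) : Int :=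
  let cards2 : List Int := 0 :: cards
  let size : Int := (cards2.length : Int)
  let cache0 : PySem.Dict Int Int :=
    (PySem.Dict.empty).insert 1 (PySem.List.pyGetD cards2 1 0)
  let cache :=
    (PySem.List.pyRange 2 (N + 1) 1).foldl (fun cache n =>
      let lm :=
        (PySem.List.pyRange 1 (if n + 1 < size then n + 1 else size) 1).foldl
          (fun lm num =>
            let v := cache.getD (n - num) 0 + PySem.List.pyGetD cards2 num 0
            if lm > v then lm else v) 0
      cache.insert n lm) cache0
  cache.getD N 0

-- ===== PORT B =====
-- literal port of Source B.  The Python work stack (top = stack[-1]) is represented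
-- head-first (top = head).  memo[n-s] is getD _ 0: the key is always present
-- when the comprehension runs (memo's keys are a contiguous prefix 0..k and the
-- branch requires n-1 ∈ memo), so the default is never consulted.  memo[0] and
-- memo[1] = cards[0] (IndexError iff cards = [], excluded by Pre_) are the two
-- initial inserts; Python's max([0] + xs) is the left fold of max over xs
-- started at 0; the while loop is ported with fuel 2*N.toNat + 2, proved
-- sufficient below (the loop makes at most 2*N - 3 iterations).
def computeB (cards : List Int) (memo : PySem.Dict Int Int) (n : Int) : Int :=
  ((PySem.List.pyRange 1 (min n ((cards.length : Nat) : Int) + 1) 1).map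
    (fun s => memo.getD (n - s) 0 + PySem.List.pyGetD cards (s - 1) 0)).foldl max 0

def loopB (cards : List Int) : Nat → List Int → PySem.Dict Int Int → PySem.Dict Int Int
  | 0, _, memo => memo
  | _ + 1, [], memo => memo
  | fuel + 1, n :: rest, memo =>
    if memo.contains n then loopB cards fuel rest memo
    else if ¬ (memo.contains (n - 1) = true) then loopB cards fuel ((n - 1) :: n :: rest) memo
    else loopB cards fuel rest (memo.insert n (computeB cards memo n))

def solution_alt (N : Int) (cards : List Int) : Int :=
  let memo0 : PySem.Dict Int Int :=
    ((PySem.Dict.empty).insert 0 0).insert 1 (PySem.List.pyGetD cards 0 0)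
  if N ≤ 0 then 0
  else (loopB cards (2 * N.toNat + 2) [N] memo0).getD N 0

-- ===== PRECONDITION & SPEC =====
-- A reads cards[1] of [0] + cards before any loop, so it raises IndexError on
-- the empty price list; exactly those inputs are excluded.
def Pre_solution (N : Int) (cards : List Int) : Prop := cards ≠ []
instance (N : Int) (cards : List Int) : Decidable (Pre_solution N cards) := by unfold Pre_solution; infer_instance
def pvWitness_solution : Int × List Int := (4, [1, 5, 6, 7])

def Spec_solution (N : Int) (cards : List Int) (out : Int) : Prop := out = solution_alt N cards
instance (N : Int) (cards : List Int) (out : Int) : Decidable (Spec_solution N cards out) := by unfold Spec_solution; infer_instance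

-- ===== CLAIM (what is proved, stated in full; the proofs are below) =====
def Claim_equal_solution : Prop := ∀ (N : Int) (cards : List Int), Dom_solution N cards → Pre_solution N cards → Spec_solution N cards (solution N cards)

-- ===== LEMMAS AND PROOFS =====

-- the common specification: the DP value at capacity n
def cSpec (cards : List Int) : Nat → Int
  | 0 => 0
  | 1 => cards.getD 0 0
  | (n+2) =>
      ((List.range (min (n+2) cards.length)).map
        (fun k => cSpec cards (n + 1 - k) + cards.getD k 0)).foldl max 0
decreasing_by omega

-- ---- A side ----

def stepA (cards : List Int) (cache : PySem.Dict Int Int) (n : Int) : PySem.Dict Int Int :=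
  let cards2 : List Int := 0 :: cards
  let size : Int := (cards2.length : Int)
  let lm :=
    (PySem.List.pyRange 1 (if n + 1 < size then n + 1 else size) 1).foldl
      (fun lm num =>
        let v := cache.getD (n - num) 0 + PySem.List.pyGetD cards2 num 0
        if lm > v then lm else v) 0
  cache.insert n lm

def cacheA (cards : List Int) : PySem.Dict Int Int :=
  (PySem.Dict.empty).insert 1 (PySem.List.pyGetD (0 :: cards) 1 0)

lemma solution_eq (N : Int) (cards : List Int) :
    solution N cards =
      ((PySem.List.pyRange 2 (N + 1) 1).foldl (stepA cards) (cacheA cards)).getD N 0 := rfl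

def Coh (cards : List Int) (cache : PySem.Dict Int Int) (m : Int) : Prop :=
  ∀ j : Int, cache.getD j 0 = if 1 ≤ j ∧ j ≤ m then cSpec cards j.toNat else 0

lemma foldl_ite_max : ∀ (l : List Int) (f : Int → Int) (a : Int),
    l.foldl (fun lm num => let v := f num; if lm > v then lm else v) a
      = (l.map f).foldl max a := by
  intro l
  induction l with
  | nil => intro f a; rfl
  | cons x xs ih =>
    intro f a
    simp only [List.foldl_cons, List.map_cons, ih]
    congr 1
    split <;> omega

lemma Coh_base (cards : List Int) : Coh cards (cacheA cards) 1 := by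
  intro j
  unfold cacheA
  rw [PySem.Dict.getD_insert]
  by_cases hj : j = 1
  · subst hj
    rcases cards with _ | ⟨c, cs⟩ <;>
      simp [cSpec, PySem.List.pyGetD, PySem.List.pyGet?, PySem.List.pyIdx?]
  · rw [if_neg hj, PySem.Dict.getD_empty]
    rw [if_neg]
    omega

lemma inner_eq (cards : List Int) (cache : PySem.Dict Int Int) (n' : Nat)
    (hC : Coh cards cache ((n' : Int) + 1)) (n : Int) (hn : n = (n' : Int) + 2) :
    (PySem.List.pyRange 1 (if n + 1 < (((0 :: cards).length : Nat) : Int) then n + 1 else (((0 :: cards).length : Nat) : Int)) 1).foldl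
      (fun lm num =>
        let v := cache.getD (n - num) 0 + PySem.List.pyGetD (0 :: cards) num 0
        if lm > v then lm else v) 0 = cSpec cards (n' + 2) := by
  subst hn
  rw [foldl_ite_max]
  have hL : (((0 :: cards).length : Nat) : Int) = (cards.length : Int) + 1 := by
    simp
  have hhi : (if ((n' : Int) + 2) + 1 < (((0 :: cards).length : Nat) : Int)
        then ((n' : Int) + 2) + 1 else (((0 :: cards).length : Nat) : Int))
      = ((min (n' + 2) cards.length : Nat) : Int) + 1 := by
    rw [hL]; split <;> push_cast <;> omega
  rw [hhi]
  have hr : PySem.List.pyRange 1 (((min (n' + 2) cards.length : Nat) : Int) + 1) 1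
      = (List.range (min (n' + 2) cards.length)).map (fun k : Nat => (1 : Int) + (k : Int)) := by
    rw [PySem.List.pyRange_one]
    have h : ((((min (n' + 2) cards.length : Nat)) : Int) + 1 - 1).toNat = min (n' + 2) cards.length := by
      omega
    rw [h]
  rw [hr, List.map_map]
  conv_rhs => rw [cSpec]
  congr 1
  apply List.map_congr_left
  intro k hk
  simp only [List.mem_range] at hk
  simp only [Function.comp_apply]
  have hj : ((n' : Int) + 2) - (1 + (k : Int)) = ((n' + 1 - k : Nat) : Int) := by omega
  have hid : (1 : Int) + (k : Int) = ((k + 1 : Nat) : Int) := by push_cast; ring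
  rw [hj, hid, hC, PySem.List.pyGetD_natCast, List.getD_cons_succ]
  by_cases hk2 : k ≤ n'
  · rw [if_pos (by constructor <;> omega)]
    simp
  · have hk3 : k = n' + 1 := by omega
    subst hk3
    rw [if_neg (by omega)]
    simp [cSpec]

lemma A_step (cards : List Int) (m : Int) (cache : PySem.Dict Int Int)
    (h1 : 1 ≤ m) (hC : Coh cards cache m) :
    Coh cards (stepA cards cache (m + 1)) (m + 1) := by
  obtain ⟨n', rfl⟩ : ∃ n' : Nat, m = (n' : Int) + 1 := ⟨(m - 1).toNat, by omega⟩
  simp only [stepA]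
  rw [inner_eq cards cache n' hC ((n' : Int) + 1 + 1) (by ring)]
  intro j
  rw [PySem.Dict.getD_insert]
  by_cases hj : j = (n' : Int) + 1 + 1
  · subst hj
    rw [if_pos rfl, if_pos (by constructor <;> omega)]
    congr 1
    try omega
  · rw [if_neg hj, hC j]
    by_cases hj2 : 1 ≤ j ∧ j ≤ (n' : Int) + 1
    · rw [if_pos hj2, if_pos (by omega)]
    · rw [if_neg hj2, if_neg (by omega)]

lemma A_loop (cards : List Int) : ∀ (t : Nat) (m : Int) (cache : PySem.Dict Int Int),
    1 ≤ m → Coh cards cache m →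
    Coh cards ((PySem.List.pyRange (m + 1) (m + 1 + t) 1).foldl (stepA cards) cache) (m + t) := by
  intro t
  induction t with
  | zero =>
    intro m cache h1 hC
    rw [PySem.List.pyRange_one_eq_nil (by omega)]
    simpa using hC
  | succ t ih =>
    intro m cache h1 hC
    push_cast
    rw [PySem.List.pyRange_one_cons (by omega)]
    rw [List.foldl_cons]
    have hb : m + 1 + ((t : Int) + 1) = (m + 1) + 1 + (t : Int) := by ring
    rw [hb]
    have h2 := ih (m + 1) (stepA cards cache (m + 1)) (by omega) (A_step cards m cache h1 hC)
    have he : m + ((t : Int) + 1) = m + 1 + (t : Int) := by ring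
    rw [he]
    exact h2

-- ---- B side ----

-- the memo after the values 0..k have been computed
def memoUpTo (cards : List Int) : Nat → PySem.Dict Int Int
  | 0 => (PySem.Dict.empty).insert 0 0
  | k + 1 => (memoUpTo cards k).insert ((k + 1 : Nat) : Int) (cSpec cards (k + 1))

lemma memoUpTo_contains (cards : List Int) : ∀ (k : Nat) (j : Int),
    (memoUpTo cards k).contains j = true ↔ (0 ≤ j ∧ j ≤ (k : Int)) := by
  intro k
  induction k with
  | zero =>
    intro j
    simp only [memoUpTo, PySem.Dict.contains_insert, PySem.Dict.contains_empty]
    simp only [Bool.or_false, beq_iff_eq]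
    omega
  | succ k ih =>
    intro j
    simp only [memoUpTo, PySem.Dict.contains_insert, Bool.or_eq_true, beq_iff_eq, ih]
    push_cast
    omega

lemma memoUpTo_getD (cards : List Int) : ∀ (k : Nat) (j : Int),
    (memoUpTo cards k).getD j 0 = if 0 ≤ j ∧ j ≤ (k : Int) then cSpec cards j.toNat else 0 := by
  intro k
  induction k with
  | zero =>
    intro j
    simp only [memoUpTo]
    rw [PySem.Dict.getD_insert]
    by_cases hj : j = 0
    · subst hj
      rw [if_pos rfl, if_pos (by omega)]
      simp [cSpec]
    · rw [if_neg (by exact_mod_cast hj), PySem.Dict.getD_empty, if_neg (by omega)]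
  | succ k ih =>
    intro j
    simp only [memoUpTo]
    rw [PySem.Dict.getD_insert]
    by_cases hj : j = ((k + 1 : Nat) : Int)
    · subst hj
      rw [if_pos rfl, if_pos (by push_cast; omega)]
      simp
    · rw [if_neg hj, ih]
      by_cases h2 : 0 ≤ j ∧ j ≤ (k : Int)
      · rw [if_pos h2, if_pos (by push_cast; omega)]
      · rw [if_neg h2, if_neg (by push_cast at hj ⊢; omega)]

lemma computeB_eq (cards : List Int) (m : Nat) :
    computeB cards (memoUpTo cards (m + 1)) ((m : Int) + 2) = cSpec cards (m + 2) := by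
  unfold computeB
  have hmin : min ((m : Int) + 2) ((cards.length : Nat) : Int) + 1
      = ((min (m + 2) cards.length : Nat) : Int) + 1 := by
    push_cast
    omega
  rw [hmin]
  have hr : PySem.List.pyRange 1 (((min (m + 2) cards.length : Nat) : Int) + 1) 1
      = (List.range (min (m + 2) cards.length)).map (fun k : Nat => (1 : Int) + (k : Int)) := by
    rw [PySem.List.pyRange_one]
    have h : ((((min (m + 2) cards.length : Nat)) : Int) + 1 - 1).toNat = min (m + 2) cards.length := by
      omega
    rw [h]
  rw [hr, List.map_map]
  conv_rhs => rw [cSpec]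
  congr 1
  apply List.map_congr_left
  intro k hk
  simp only [List.mem_range] at hk
  simp only [Function.comp_apply]
  have hj : ((m : Int) + 2) - (1 + (k : Int)) = ((m + 1 - k : Nat) : Int) := by omega
  have hid : (1 : Int) + (k : Int) - 1 = ((k : Nat) : Int) := by ring
  rw [hj, hid, memoUpTo_getD, PySem.List.pyGetD_natCast]
  rw [if_pos (by refine ⟨by omega, ?_⟩; push_cast; omega)]
  simp

-- the stack [k, k+1, ..., k+t] (top first)
def ascList (k t : Nat) : List Int :=
  (List.range (t + 1)).map (fun i => ((k + i : Nat) : Int))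

lemma ascList_zero (k : Nat) : ascList k 0 = [((k : Nat) : Int)] := by
  simp [ascList]

lemma ascList_succ (k t : Nat) :
    ascList k (t + 1) = ((k : Nat) : Int) :: ascList (k + 1) t := by
  unfold ascList
  rw [List.range_succ_eq_map, List.map_cons, List.map_map]
  have hh : ((k + 0 : Nat) : Int) = ((k : Nat) : Int) := by norm_num
  rw [hh]
  have ht : ((List.range (t + 1)).map ((fun i : Nat => ((k + i : Nat) : Int)) ∘ Nat.succ))
      = (List.range (t + 1)).map (fun i : Nat => ((k + 1 + i : Nat) : Int)) := by
    apply List.map_congr_left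
    intro i _
    simp only [Function.comp_apply]
    push_cast
    ring
  rw [ht]

lemma loopB_nil (cards : List Int) (fuel : Nat) (memo : PySem.Dict Int Int) :
    loopB cards fuel [] memo = memo := by
  cases fuel <;> rfl

lemma loopB_pop (cards : List Int) (f : Nat) (n : Int) (rest : List Int)
    (memo : PySem.Dict Int Int) (h : memo.contains n = true) :
    loopB cards (f + 1) (n :: rest) memo = loopB cards f rest memo := by
  rw [loopB, if_pos h]

lemma loopB_push (cards : List Int) (f : Nat) (n : Int) (rest : List Int)
    (memo : PySem.Dict Int Int) (h1 : memo.contains n = false)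
    (h2 : memo.contains (n - 1) = false) :
    loopB cards (f + 1) (n :: rest) memo = loopB cards f ((n - 1) :: n :: rest) memo := by
  rw [loopB, if_neg (by simp [h1]), if_pos (by simp [h2])]

lemma loopB_compute (cards : List Int) (f : Nat) (n : Int) (rest : List Int)
    (memo : PySem.Dict Int Int) (h1 : memo.contains n = false)
    (h2 : memo.contains (n - 1) = true) :
    loopB cards (f + 1) (n :: rest) memo
      = loopB cards f rest (memo.insert n (computeB cards memo n)) := by
  rw [loopB, if_neg (by simp [h1]), if_neg (by simp [h2])]

lemma memoUpTo_unfold (cards : List Int) (m : Nat) :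
    memoUpTo cards (m + 2) = (memoUpTo cards (m + 1)).insert ((m : Int) + 2) (cSpec cards (m + 2)) := by
  show memoUpTo cards ((m + 1) + 1) = _
  rw [memoUpTo]
  have hk : (((m + 1) + 1 : Nat) : Int) = (m : Int) + 2 := by push_cast; ring
  rw [hk]

lemma ascList_head (k t : Nat) : ∃ r, ascList k t = ((k : Nat) : Int) :: r := by
  cases t with
  | zero => exact ⟨[], ascList_zero k⟩
  | succ t => exact ⟨ascList (k + 1) t, ascList_succ k t⟩

lemma B_ascend (cards : List Int) : ∀ (t k fuel : Nat), 2 ≤ k → t + 1 ≤ fuel →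
    loopB cards fuel (ascList k t) (memoUpTo cards (k - 1)) = memoUpTo cards (k + t) := by
  intro t
  induction t with
  | zero =>
    intro k fuel hk hf
    obtain ⟨f, rfl⟩ : ∃ f, fuel = f + 1 := ⟨fuel - 1, by omega⟩
    obtain ⟨m, rfl⟩ : ∃ m, k = m + 2 := ⟨k - 2, by omega⟩
    rw [ascList_zero]
    rw [loopB_compute cards f _ _ _
      (by rw [← Bool.not_eq_true]; intro h; have := (memoUpTo_contains cards _ _).mp h; omega)
      ((memoUpTo_contains cards _ _).mpr (by push_cast; omega))]
    rw [loopB_nil]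
    have h1 : (m + 2) - 1 = m + 1 := by omega
    rw [h1]
    have h2 : ((m + 2 : Nat) : Int) = (m : Int) + 2 := by push_cast; ring
    rw [h2, computeB_eq]
    have h3 : (m + 2) + 0 = m + 2 := by omega
    rw [h3, memoUpTo_unfold]
  | succ t ih =>
    intro k fuel hk hf
    obtain ⟨f, rfl⟩ : ∃ f, fuel = f + 1 := ⟨fuel - 1, by omega⟩
    obtain ⟨m, rfl⟩ : ∃ m, k = m + 2 := ⟨k - 2, by omega⟩
    rw [ascList_succ]
    rw [loopB_compute cards f _ _ _
      (by rw [← Bool.not_eq_true]; intro h; have := (memoUpTo_contains cards _ _).mp h; omega)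
      ((memoUpTo_contains cards _ _).mpr (by push_cast; omega))]
    have h1 : (m + 2) - 1 = m + 1 := by omega
    rw [h1]
    have h2 : ((m + 2 : Nat) : Int) = (m : Int) + 2 := by push_cast; ring
    rw [h2, computeB_eq, ← memoUpTo_unfold]
    have h4 := ih (m + 2 + 1) f (by omega) (by omega)
    simp only [Nat.add_sub_cancel] at h4
    rw [h4]
    congr 1
    omega

lemma B_descend (cards : List Int) : ∀ (t u fuel : Nat), t ≤ fuel →
    loopB cards fuel (ascList (2 + t) u) (memoUpTo cards 1)
      = loopB cards (fuel - t) (ascList 2 (u + t)) (memoUpTo cards 1) := by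
  intro t
  induction t with
  | zero =>
    intro u fuel _
    simp
  | succ t ih =>
    intro u fuel hf
    obtain ⟨f, rfl⟩ : ∃ f, fuel = f + 1 := ⟨fuel - 1, by omega⟩
    obtain ⟨r, hr⟩ := ascList_head (2 + (t + 1)) u
    rw [hr]
    rw [loopB_push cards f _ _ _
      (by rw [← Bool.not_eq_true]; intro h
          have := (memoUpTo_contains cards 1 _).mp h; push_cast at this; omega)
      (by rw [← Bool.not_eq_true]; intro h
          have := (memoUpTo_contains cards 1 _).mp h; push_cast at this; omega)]
    rw [← hr]
    have hstep : ((2 + (t + 1) : Nat) : Int) - 1 = ((2 + t : Nat) : Int) := by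
      push_cast; ring
    rw [hstep]
    have hcons : ((2 + t : Nat) : Int) :: ascList (2 + (t + 1)) u = ascList (2 + t) (u + 1) := by
      rw [ascList_succ]
      congr 1
    rw [hcons]
    rw [ih (u + 1) f (by omega)]
    have he1 : f + 1 - (t + 1) = f - t := by omega
    have he2 : u + 1 + t = u + (t + 1) := by omega
    rw [he1, he2]

-- memo0 of the B port is memoUpTo 1 (on a nonempty price list)
lemma memo0_eq (cards : List Int) (h : cards ≠ []) :
    ((PySem.Dict.empty).insert 0 0).insert 1 (PySem.List.pyGetD cards 0 0)
      = memoUpTo cards 1 := by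
  show _ = (memoUpTo cards 0).insert ((0 + 1 : Nat) : Int) (cSpec cards (0 + 1))
  rw [memoUpTo]
  congr 1
  rcases cards with _ | ⟨c, cs⟩
  · exact absurd rfl h
  · simp [cSpec, PySem.List.pyGetD, PySem.List.pyGet?, PySem.List.pyIdx?]

theorem solution_spec : Claim_equal_solution := by
  intro N cards _ hpre
  unfold Spec_solution
  rcases lt_trichotomy N 1 with hN | hN | hN
  · -- N ≤ 0
    have h0 : N ≤ 0 := by omega
    rw [solution_eq, PySem.List.pyRange_one_eq_nil (by omega), List.foldl_nil]
    unfold solution_alt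
    rw [if_pos h0]
    unfold cacheA
    rw [PySem.Dict.getD_insert, if_neg (by omega), PySem.Dict.getD_empty]
  · -- N = 1
    subst hN
    rw [solution_eq, PySem.List.pyRange_one_eq_nil (by omega), List.foldl_nil]
    show (cacheA cards).getD 1 0
      = if (1 : Int) ≤ 0 then 0
        else (loopB cards (2 * (1 : Int).toNat + 2) [1]
          (((PySem.Dict.empty).insert 0 0).insert 1 (PySem.List.pyGetD cards 0 0))).getD 1 0
    rw [if_neg (by omega), memo0_eq cards hpre]
    have hfuel : 2 * (1 : Int).toNat + 2 = 3 + 1 := by norm_num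
    rw [hfuel]
    rw [loopB_pop cards 3 _ _ _ ((memoUpTo_contains cards 1 1).mpr (by omega))]
    rw [loopB_nil, memoUpTo_getD cards 1 1, if_pos (by omega)]
    unfold cacheA
    rw [PySem.Dict.getD_insert, if_pos rfl]
    rcases cards with _ | ⟨c, cs⟩
    · exact absurd rfl hpre
    · simp [cSpec, PySem.List.pyGetD, PySem.List.pyGet?, PySem.List.pyIdx?]
  · -- N ≥ 2
    obtain ⟨t, ht, hNt⟩ : ∃ t : Nat, 1 ≤ t ∧ N = 1 + (t : Int) := ⟨(N - 1).toNat, by omega, by omega⟩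
    rw [solution_eq]
    have hrg : PySem.List.pyRange 2 (N + 1) 1 = PySem.List.pyRange ((1 : Int) + 1) ((1 : Int) + 1 + (t : Int)) 1 := by
      congr 1
      omega
    have hA := A_loop cards t 1 (cacheA cards) (by omega) (Coh_base cards)
    rw [hrg, hA N, if_pos (by constructor <;> omega)]
    -- B side
    set M : Nat := N.toNat with hM
    have hM2 : 2 ≤ M := by omega
    have hMN : ((M : Nat) : Int) = N := by omega
    show cSpec cards N.toNat
      = if N ≤ 0 then 0
        else (loopB cards (2 * N.toNat + 2) [N]
          (((PySem.Dict.empty).insert 0 0).insert 1 (PySem.List.pyGetD cards 0 0))).getD N 0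
    rw [if_neg (by omega), memo0_eq cards hpre]
    have hstack : [N] = ascList (2 + (M - 2)) 0 := by
      rw [ascList_zero]
      congr 1
      omega
    rw [hstack]
    rw [B_descend cards (M - 2) 0 (2 * M + 2) (by omega)]
    have hfix : 2 ≤ (2 : Nat) := le_refl 2
    have := B_ascend cards (M - 2) 2 (2 * M + 2 - (M - 2)) hfix (by omega)
    have h21 : (2 : Nat) - 1 = 1 := rfl
    rw [h21] at this
    have hz : (0 : Nat) + (M - 2) = M - 2 := by omega
    rw [hz, this]
    have h2M : 2 + (M - 2) = M := by omega
    rw [h2M]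
    rw [memoUpTo_getD cards M N, if_pos (by omega)]
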